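-- pv_equiv track=rewrite | github.com/crystal993/Algorithm | DataStructure/05_피보나치수열.py | solution
-- ===== SOURCE A (Python) =====
-- def solution(x):
--     fn = 0
--     for i in range(x-1):
--         pre = i
--         af = i+1
--         if af > x:
--             break
--         fn = pre + af
--     return fn
-- ===== SOURCE B (Python) =====
-- def solution(x):
--     # Closed form of A's loop: the break never fires, so the final iteration
--     # alone determines fn; when the range is empty, fn keeps its initial value.
--     return 0 if x < 2 else 2 * x - 3
-- ===== Notes on version B (the rewrite author's own statement) =====
-- stated objective: faster
-- what changed: Replaced the linear loop (whose break never fires and whose final iteration alone determines the result) with a direct closed-form expression.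
import Mathlib
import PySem

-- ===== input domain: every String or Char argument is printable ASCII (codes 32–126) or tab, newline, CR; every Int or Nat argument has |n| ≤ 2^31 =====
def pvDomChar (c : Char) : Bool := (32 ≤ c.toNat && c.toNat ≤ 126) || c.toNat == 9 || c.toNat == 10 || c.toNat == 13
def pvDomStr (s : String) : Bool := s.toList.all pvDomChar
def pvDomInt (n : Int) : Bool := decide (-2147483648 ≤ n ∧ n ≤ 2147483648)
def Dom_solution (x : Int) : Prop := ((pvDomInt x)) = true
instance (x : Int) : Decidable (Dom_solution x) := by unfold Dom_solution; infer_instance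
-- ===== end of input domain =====

-- B replaces A's O(x) loop (break never fires; the last iteration decides fn) with the closed form 0 / 2*x-3.

-- ===== PORT A =====
-- loop over range(x-1) carrying fn; the 'break' returns the accumulator early
def solutionLoop (l : List Int) (x : Int) (fn : Int) : Int :=
  match l with
  | [] => fn
  | i :: rest =>
      let pre := i
      let af := i + 1
      if af > x then fn else solutionLoop rest x (pre + af)

def solution (x : Int) : Int :=
  solutionLoop (PySem.List.pyRange 0 (x - 1) 1) x 0

-- ===== PORT B =====
def solution_alt (x : Int) : Int :=
  if x < 2 then 0 else 2 * x - 3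

-- ===== PRECONDITION & SPEC =====
def Spec_solution (x : Int) (out : Int) : Prop := out = solution_alt x
instance (x : Int) (out : Int) : Decidable (Spec_solution x out) := by unfold Spec_solution; infer_instance

-- ===== CLAIM (what is proved, stated in full; the proofs are below) =====
def Claim_equal_solution : Prop := ∀ (x : Int), Dom_solution x → Spec_solution x (solution x)

-- ===== LEMMAS AND PROOFS =====

-- Running the loop over range(a, b) with b ≤ x never breaks and ends with fn = 2*(b-1)+1 = 2*b-3+2... = 2*b-1
theorem solutionLoop_range (x b : Int) (hbx : b ≤ x) :
    ∀ a fn, a < b → solutionLoop (PySem.List.pyRange a b 1) x fn = 2 * b - 1 := by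
  have h : ∀ n : Nat, ∀ a fn, a < b → (b - a).toNat = n →
      solutionLoop (PySem.List.pyRange a b 1) x fn = 2 * b - 1 := by
    intro n
    induction n with
    | zero => intro a fn hab hn; omega
    | succ k ih =>
      intro a fn hab hn
      rw [PySem.List.pyRange_one_cons hab]
      simp only [solutionLoop]
      rw [if_neg (by omega)]
      by_cases h2 : a + 1 < b
      · exact ih (a + 1) _ h2 (by omega)
      · have hb : b = a + 1 := by omega
        subst hb
        rw [PySem.List.pyRange_one_eq_nil (by omega)]
        simp [solutionLoop]; ring
  intro a fn hab
  exact h (b - a).toNat a fn hab rfl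

-- ===== VERDICT (by name: the statement is the Claim_ definition above) =====
theorem solution_spec : Claim_equal_solution := by
  intro x _
  unfold Spec_solution solution solution_alt
  by_cases hx : x < 2
  · rw [PySem.List.pyRange_one_eq_nil (by omega)]
    simp [solutionLoop, hx]
  · rw [solutionLoop_range x (x - 1) (by omega) 0 0 (by omega)]
    rw [if_neg hx]; ring
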